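-- pv_equiv track=rewrite | github.com/simphony/simphony-mayavi | simphony_mayavi/core/cell_array_tools.py | cell_array_slicer
-- ===== SOURCE A (Python) =====
-- def cell_array_slicer(data):
--     """ Iterate over cell components on a vtk cell array
--
--     VTK stores the associated point index for each cell in a one
--     dimensional array based on the following template::
--
--       [n, id0, id1, id2, ..., idn, m, id0, ...]
--
--     The iterator takes a cell array and returns the point indices for
--     each cell.
--
--     """
--     count = 0
--     collection = []
--     for value in data:
--         if count == 0:
--             collection = []
--             count = value
--         else:
--             collection.append(value)
--             count -= 1
--             if count == 0:
--                 yield collection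
-- ===== SOURCE B (Python) =====
-- from itertools import islice
--
--
-- def cell_array_slicer(data):
--     """Yield the point-index list of each cell in a flat VTK cell array.
--
--     Reads the leading count of each cell and slices that many points off
--     the stream in one step; a complete cell is yielded as a list.
--     """
--     it = iter(data)
--     for n in it:
--         cell = list(islice(it, n))
--         if len(cell) == n:
--             yield cell
-- ===== Notes on version B (the rewrite author's own statement) =====
-- stated objective: idiomatic
-- what changed: Replaces A's element-by-element countdown state machine (count/collection accumulators mutated per value) with an iterator-consuming pass: read each cell's count, slice the whole block with itertools.islice, yield it if complete. Pre_ excludes arrays with a nonpositive count in a count position: on a negative count A silently swallows the rest of the stream while B's islice raises ValueError, and on a zero count A silently skips the cell (A never yields an empty point list) while B yields an empty point list -- a degenerate corner where either value is defensible.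
-- outside the precondition, e.g. on cell_array_slicer([-1, 5]): A returns [], B raises ValueError; on cell_array_slicer([0, 2, 7, 8]): A returns [[7, 8]], B returns [[], [7, 8]]
import Mathlib
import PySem

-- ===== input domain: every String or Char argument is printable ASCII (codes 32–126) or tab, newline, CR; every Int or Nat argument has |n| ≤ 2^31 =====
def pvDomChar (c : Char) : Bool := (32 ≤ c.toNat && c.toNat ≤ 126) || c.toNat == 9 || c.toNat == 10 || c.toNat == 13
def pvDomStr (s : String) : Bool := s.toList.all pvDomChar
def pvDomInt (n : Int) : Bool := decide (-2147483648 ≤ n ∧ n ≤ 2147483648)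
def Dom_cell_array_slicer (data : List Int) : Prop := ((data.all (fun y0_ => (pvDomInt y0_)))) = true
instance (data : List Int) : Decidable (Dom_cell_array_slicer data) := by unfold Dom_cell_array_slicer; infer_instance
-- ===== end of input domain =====

-- B replaces A's per-element countdown state machine with an iterator-consuming
-- pass that slices each cell's block whole (itertools.islice); same cost,
-- different decomposition.  Equivalence is proved on well-formed cell arrays
-- (every count positive, see Pre_).

-- ===== PORT A =====
-- A is a generator; its port returns the list of yielded values.  State:
-- (count, collection, acc) folded over data, as in A's single for-loop.
def cell_array_slicer (data : List Int) : List (List Int) :=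
  (data.foldl
    (fun (st : Int × List Int × List (List Int)) value =>
      let count := st.1
      let collection := st.2.1
      let acc := st.2.2
      if count = 0 then
        (value, ([] : List Int), acc)
      else
        let collection := collection ++ [value]
        let count := count - 1
        if count = 0 then (count, collection, acc ++ [collection])
        else (count, collection, acc))
    (0, [], [])).2.2

-- ===== PORT B =====
-- for n in it: cell = list(islice(it, n)); if len(cell) == n: yield cell
-- islice(it, n) takes (at most) n items off the shared iterator: take/drop of
-- n.toNat on the remainder (exact for n ≥ 0, i.e. on all of Pre_; for n < 0
-- islice raises ValueError, which Pre_ excludes).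
def cell_array_slicer_alt_run : List Int → List (List Int)
  | [] => []
  | n :: rest =>
      let cell := rest.take n.toNat
      if (cell.length : Int) = n then
        cell :: cell_array_slicer_alt_run (rest.drop n.toNat)
      else
        cell_array_slicer_alt_run (rest.drop n.toNat)
termination_by l => l.length
decreasing_by all_goals simp [List.length_drop]

def cell_array_slicer_alt (data : List Int) : List (List Int) :=
  cell_array_slicer_alt_run data

-- ===== PRECONDITION & SPEC =====
-- The counts found at the cell-boundary positions of the array (the first
-- element, then the element right after each block of that many points) —
-- a shape condition on the input dictated by the VTK cell-array format
-- itself, not a run of either program.  'skip' points remain in the current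
-- block; structural recursion on the list.
def pvCellCountsAux : List Int → Nat → List Int
  | [], _ => []
  | x :: rest, 0 => x :: pvCellCountsAux rest x.toNat
  | _ :: rest, skip + 1 => pvCellCountsAux rest skip

def pvCellCounts (l : List Int) : List Int := pvCellCountsAux l 0

-- Pre_ excludes arrays with a nonpositive count in a count position: on a
-- negative count A silently swallows the rest of the stream while B's islice
-- raises ValueError, and on a zero count A silently skips the cell (A never
-- yields an empty point list) while B yields an empty point list — a corner
-- where either value is defensible.
def Pre_cell_array_slicer (data : List Int) : Prop :=
  ∀ n ∈ pvCellCounts data, 0 < n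
instance (data : List Int) : Decidable (Pre_cell_array_slicer data) := by
  unfold Pre_cell_array_slicer; infer_instance

def pvWitness_cell_array_slicer : List Int := [2, 7, 8, 1, 5]

def Spec_cell_array_slicer (data : List Int) (out : List (List Int)) : Prop := out = cell_array_slicer_alt data
instance (data : List Int) (out : List (List Int)) : Decidable (Spec_cell_array_slicer data out) := by unfold Spec_cell_array_slicer; infer_instance

-- ===== CLAIM (what is proved, stated in full; the proofs are below) =====
def Claim_equal_cell_array_slicer : Prop := ∀ (data : List Int), Dom_cell_array_slicer data → Pre_cell_array_slicer data → Spec_cell_array_slicer data (cell_array_slicer data)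

-- ===== LEMMAS AND PROOFS =====

-- Recursive characterisation of A's fold.
def aRun : Int → List Int → List Int → List (List Int)
  | _, _, [] => []
  | count, collection, v :: rest =>
    if count = 0 then aRun v [] rest
    else if count - 1 = 0 then (collection ++ [v]) :: aRun 0 (collection ++ [v]) rest
    else aRun (count - 1) (collection ++ [v]) rest

lemma foldl_eq_aRun (l : List Int) (count : Int) (collection : List Int)
    (acc : List (List Int)) :
    (l.foldl
      (fun (st : Int × List Int × List (List Int)) value =>
        let count := st.1
        let collection := st.2.1
        let acc := st.2.2
        if count = 0 then
          (value, ([] : List Int), acc)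
        else
          let collection := collection ++ [value]
          let count := count - 1
          if count = 0 then (count, collection, acc ++ [collection])
          else (count, collection, acc))
      (count, collection, acc)).2.2 = acc ++ aRun count collection l := by
  induction l generalizing count collection acc with
  | nil => simp [aRun]
  | cons v rest ih =>
    by_cases h0 : count = 0
    · simp [List.foldl, h0, aRun, ih]
    · by_cases h1 : count - 1 = 0
      · simp [List.foldl, h0, h1, aRun, ih]
      · simp [List.foldl, h0, h1, aRun, ih]

lemma aRun_zero_collection (collection l : List Int) :
    aRun 0 collection l = aRun 0 [] l := by
  cases l <;> simp [aRun]

lemma aRun_pos (n : Nat) (hn : 0 < n) (collection l : List Int) :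
    aRun (n : Int) collection l =
      if n ≤ l.length then
        (collection ++ l.take n) :: aRun 0 [] (l.drop n)
      else [] := by
  induction n generalizing collection l with
  | zero => omega
  | succ m ih =>
    cases l with
    | nil => simp [aRun]
    | cons v rest =>
      by_cases hm : m = 0
      · subst hm
        simp [aRun, aRun_zero_collection]
      · have hm' : 0 < m := by omega
        have hne : ((m + 1 : Nat) : Int) ≠ 0 := by push_cast; omega
        have hsub : ((m + 1 : Nat) : Int) - 1 = (m : Int) := by push_cast; ring
        have h1 : ¬ ((m + 1 : Nat) : Int) - 1 = 0 := by rw [hsub]; exact_mod_cast hm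
        simp only [aRun, hne, if_false, h1]
        rw [hsub, ih hm' (collection ++ [v]) rest]
        by_cases hlen : m ≤ rest.length
        · have : m + 1 ≤ (v :: rest).length := by simp; omega
          simp [hlen, List.take_succ_cons]
        · simp [hlen]

lemma pvCellCountsAux_eq_drop (l : List Int) (k : Nat) :
    pvCellCountsAux l k = pvCellCountsAux (l.drop k) 0 := by
  induction l generalizing k with
  | nil => simp [pvCellCountsAux]
  | cons x rest ih =>
    cases k with
    | zero => rfl
    | succ k => simpa [pvCellCountsAux] using ih k

lemma pvCellCounts_cons (n : Int) (rest : List Int) :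
    pvCellCounts (n :: rest) = n :: pvCellCounts (rest.drop n.toNat) := by
  rw [pvCellCounts, pvCellCountsAux, pvCellCountsAux_eq_drop]
  rfl

lemma aRun_eq_altRun (l : List Int) (h : ∀ n ∈ pvCellCounts l, 0 < n) :
    aRun 0 [] l = cell_array_slicer_alt_run l := by
  generalize hk : l.length = k
  induction k using Nat.strong_induction_on generalizing l with
  | _ k ih =>
    cases l with
    | nil => simp [aRun, cell_array_slicer_alt_run]
    | cons n rest =>
      have hn : 0 < n := h n (by rw [pvCellCounts_cons]; exact List.mem_cons_self)
      obtain ⟨m, hm⟩ : ∃ m : Nat, n = (m : Int) :=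
        ⟨n.toNat, (Int.toNat_of_nonneg (le_of_lt hn)).symm⟩
      subst hm
      have hmpos : 0 < m := by exact_mod_cast hn
      have hrest : ∀ x ∈ pvCellCounts (rest.drop m), 0 < x := by
        intro x hx
        refine h x ?_
        rw [pvCellCounts_cons, Int.toNat_natCast]
        exact List.mem_cons_of_mem _ hx
      have hrec := ih (rest.drop m).length
        (by rw [← hk]; simp) (rest.drop m) hrest rfl
      rw [show aRun 0 [] ((m : Int) :: rest) = aRun (m : Int) [] rest by simp [aRun]]
      rw [aRun_pos m hmpos, cell_array_slicer_alt_run]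
      simp only [Int.toNat_natCast]
      by_cases hle : m ≤ rest.length
      · rw [if_pos hle, if_pos (by rw [List.length_take_of_le hle]), hrec]
        simp
      · rw [if_neg hle,
          if_neg (by intro hc; rw [List.length_take] at hc; omega),
          List.drop_eq_nil_of_le (by omega)]
        simp [cell_array_slicer_alt_run]

-- ===== VERDICT (by name: the statement is the Claim_ definition above) =====
theorem cell_array_slicer_spec : Claim_equal_cell_array_slicer := by
  intro data _ hpre
  unfold Spec_cell_array_slicer cell_array_slicer cell_array_slicer_alt
  rw [foldl_eq_aRun, aRun_eq_altRun data hpre]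
  simp
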